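-- pv_equiv track=rewrite | github.com/CalvinNeo/LeetCode | python/leetcode.2453.py | destroyTargets
-- ===== SOURCE A (Python) =====
-- def destroyTargets(nums, space):
--     """
--     :type nums: List[int]
--     :type space: int
--     :rtype: int
--     """
--     m = {}
--     for n in nums:
--         mm = n % space
--         if mm == 0:
--             mm = space
--         if mm in m:
--             m[mm] = (m[mm][0] + 1, min(m[mm][1], n))
--         else:
--             m[mm] = (1, n)
--     m = list(m.values())
--     m.sort(key = lambda x: (x[0], -x[1]))
--     r = m[-1][1]
--     return r
-- ===== SOURCE B (Python) =====
-- def destroyTargets(nums, space):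
--     """
--     :type nums: List[int]
--     :type space: int
--     :rtype: int
--     """
--     groups = {}
--     for n in nums:
--         r = n % space
--         if r == 0:
--             r = space
--         c, v = groups.get(r, (0, n))
--         groups[r] = (c + 1, min(v, n))
--     best = None
--     for c, v in groups.values():
--         if best is None or c > best[0] or (c == best[0] and v < best[1]):
--             best = (c, v)
--     return best[1]
-- ===== Notes on version B (the rewrite author's own statement) =====
-- stated objective: faster
-- what changed: B replaces A's sort of the residue groups (sort by (count,-min), take last) with a single linear scan keeping the best (max count, tie smallest min) group, and folds A's if/else dict update into one get-with-default step.
import Mathlib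
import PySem

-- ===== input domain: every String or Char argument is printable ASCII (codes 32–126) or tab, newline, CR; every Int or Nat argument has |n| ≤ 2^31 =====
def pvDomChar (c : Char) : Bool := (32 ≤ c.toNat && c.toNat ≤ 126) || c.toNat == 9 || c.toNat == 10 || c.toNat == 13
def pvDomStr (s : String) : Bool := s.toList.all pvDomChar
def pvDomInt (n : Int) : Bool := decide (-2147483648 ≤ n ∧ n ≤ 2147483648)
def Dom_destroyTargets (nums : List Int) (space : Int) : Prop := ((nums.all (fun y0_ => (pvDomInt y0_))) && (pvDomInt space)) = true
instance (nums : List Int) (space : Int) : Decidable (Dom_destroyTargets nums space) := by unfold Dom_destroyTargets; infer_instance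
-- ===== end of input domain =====

-- B replaces A's sort-then-take-last over the residue groups by one linear scan for the best group (asymptotically faster in the number of groups).


-- ===== PORT A =====
-- A-side helper: A's first loop, building the dict m (count, running min per residue class)
def destroyTargetsGroups (nums : List Int) (space : Int) : PySem.Dict Int (Int × Int) :=
  nums.foldl (fun d n =>
    let mm0 := PySem.Int.mod n space
    let mm := if mm0 = 0 then space else mm0
    if d.contains mm then
      d.insert mm ((d.getD mm (0, 0)).1 + 1, min (d.getD mm (0, 0)).2 n)
    else
      d.insert mm (1, n)) PySem.Dict.empty

def destroyTargets (nums : List Int) (space : Int) : Int :=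
  let s := PySem.List.sorted2 (destroyTargetsGroups nums space).values (fun x => x.1) (fun x => -x.2)
  (PySem.List.pyGetD s (-1) (0, 0)).2

-- ===== PORT B =====
-- B-side helper: B's grouping loop (get-with-default update, no membership branch)
def destroyTargetsGroups_alt (nums : List Int) (space : Int) : PySem.Dict Int (Int × Int) :=
  nums.foldl (fun d n =>
    let r0 := PySem.Int.mod n space
    let r := if r0 = 0 then space else r0
    let p := d.getD r (0, n)
    d.insert r (p.1 + 1, min p.2 n)) PySem.Dict.empty

def destroyTargets_alt (nums : List Int) (space : Int) : Int :=
  let best := (destroyTargetsGroups_alt nums space).values.foldl (fun best cv =>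
    match best with
    | none => some cv
    | some b => if cv.1 > b.1 ∨ (cv.1 = b.1 ∧ cv.2 < b.2) then some cv else some b) none
  match best with
  | some b => b.2
  | none => 0  -- unreachable under Pre_ (nums ≠ []); Source B raises TypeError there

-- ===== PRECONDITION & SPEC =====
-- Pre_ excludes exactly the inputs where A raises: space = 0 (ZeroDivisionError) and nums = [] (IndexError on m[-1]).
def Pre_destroyTargets (nums : List Int) (space : Int) : Prop := nums ≠ [] ∧ space ≠ 0
instance (nums : List Int) (space : Int) : Decidable (Pre_destroyTargets nums space) := by unfold Pre_destroyTargets; infer_instance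
def pvWitness_destroyTargets : List Int × Int := ([3, 7, 8, 1, 1, 5], 2)
def Spec_destroyTargets (nums : List Int) (space : Int) (out : Int) : Prop := out = destroyTargets_alt nums space
instance (nums : List Int) (space : Int) (out : Int) : Decidable (Spec_destroyTargets nums space out) := by unfold Spec_destroyTargets; infer_instance

-- ===== CLAIM (what is proved, stated in full; the proofs are below) =====
def Claim_equal_destroyTargets : Prop := ∀ (nums : List Int) (space : Int), Dom_destroyTargets nums space → Pre_destroyTargets nums space → Spec_destroyTargets nums space (destroyTargets nums space)

-- ===== LEMMAS AND PROOFS =====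

-- "a is strictly worse than b" under A's sort key (count, -min) / B's scan test.
def pvLtp (a b : Int × Int) : Prop := a.1 < b.1 ∨ (a.1 = b.1 ∧ b.2 < a.2)

theorem pvLtp_irrefl (a : Int × Int) : ¬ pvLtp a a := by
  simp [pvLtp]

theorem pvLtp_trans {a b c : Int × Int} (h₁ : pvLtp a b) (h₂ : pvLtp b c) : pvLtp a c := by
  rcases a with ⟨a1, a2⟩; rcases b with ⟨b1, b2⟩; rcases c with ⟨c1, c2⟩
  simp only [pvLtp] at *; omega

theorem pvLtp_of_ltp_of_not {a b c : Int × Int} (h₁ : pvLtp a b) (h₂ : ¬ pvLtp c b) : pvLtp a c := by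
  rcases a with ⟨a1, a2⟩; rcases b with ⟨b1, b2⟩; rcases c with ⟨c1, c2⟩
  simp only [pvLtp] at *; omega

theorem pvLtp_antisymm {a b : Int × Int} (h₁ : ¬ pvLtp a b) (h₂ : ¬ pvLtp b a) : a = b := by
  rcases a with ⟨a1, a2⟩; rcases b with ⟨b1, b2⟩
  simp only [pvLtp, Prod.mk.injEq] at *; omega

-- the boolean "before" test A's sorted2 uses
def pvBf : (Int × Int) → (Int × Int) → Bool :=
  fun a b => decide (a.1 < b.1) || (!decide (b.1 < a.1) && decide (-a.2 < -b.2))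

theorem pv_before_eq (a b : Int × Int) : pvBf a b = true ↔ pvLtp a b := by
  rcases a with ⟨a1, a2⟩; rcases b with ⟨b1, b2⟩
  simp only [pvBf, pvLtp]
  by_cases h : a1 < b1 <;> by_cases h' : b1 < a1 <;> by_cases h'' : -a2 < -b2 <;>
    simp [h, h', h''] <;> omega

theorem pv_insertBy_nil (x : Int × Int) : PySem.List.insertBy pvBf x [] = [x] := rfl

theorem pv_insertBy_cons (x y : Int × Int) (ys : List (Int × Int)) :
    PySem.List.insertBy pvBf x (y :: ys) =
      if pvBf x y then x :: y :: ys else y :: PySem.List.insertBy pvBf x ys := rfl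

theorem pv_insertBy_ne_nil (x : Int × Int) (ys : List (Int × Int)) :
    PySem.List.insertBy pvBf x ys ≠ [] := by
  induction ys with
  | nil => simp [pv_insertBy_nil]
  | cons y ys ih =>
    rw [pv_insertBy_cons]
    split <;> simp_all

-- "a last element of acc is a maximum of acc"
def pvMaxLast (acc : List (Int × Int)) : Prop :=
  ∀ L, acc.getLast? = some L → ∀ y ∈ acc, ¬ pvLtp L y

theorem pv_maxLast_insertBy {acc : List (Int × Int)} (hM : pvMaxLast acc) (x : Int × Int) :
    pvMaxLast (PySem.List.insertBy pvBf x acc) := by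
  induction acc with
  | nil =>
    intro L hL y hy
    rw [pv_insertBy_nil] at hL hy
    simp only [List.getLast?_singleton, Option.some.injEq] at hL
    simp only [List.mem_singleton] at hy
    subst hL; subst hy
    exact pvLtp_irrefl _
  | cons a as ih =>
    have hMas : pvMaxLast as := by
      intro L hL y hy
      cases as with
      | nil => simp at hL
      | cons b bs =>
        exact hM L (by rw [List.getLast?_cons_cons]; exact hL) y (List.mem_cons_of_mem a hy)
    by_cases hb : pvBf x a = true
    · intro L hL y hy
      rw [pv_insertBy_cons, if_pos hb] at hL hy
      rw [List.getLast?_cons_cons] at hL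
      have hxa : pvLtp x a := (pv_before_eq x a).mp hb
      rcases List.mem_cons.mp hy with rfl | h2
      · intro hc
        exact hM L hL a List.mem_cons_self (pvLtp_trans hc hxa)
      · exact hM L hL y h2
    · intro L hL y hy
      rw [pv_insertBy_cons, if_neg hb] at hL hy
      have hne' := pv_insertBy_ne_nil x as
      obtain ⟨b, bs, hbs⟩ := List.exists_cons_of_ne_nil hne'
      rw [hbs, List.getLast?_cons_cons] at hL
      have hins := ih hMas
      have hLmax : ∀ z ∈ PySem.List.insertBy pvBf x as, ¬ pvLtp L z :=
        hins L (by rw [hbs]; exact hL)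
      rcases List.mem_cons.mp hy with rfl | h2
      · -- show the new last is not worse than a
        have hLmem : L ∈ PySem.List.insertBy pvBf x as := by
          rw [hbs]; exact List.mem_of_getLast? hL
        rcases (PySem.List.mem_insertBy pvBf x L as).mp hLmem with hEq | hmem
        · subst hEq; intro hc; exact hb ((pv_before_eq _ _).mpr hc)
        · have hnen : as ≠ [] := List.ne_nil_of_mem hmem
          have h1' : ¬ pvLtp L (as.getLast hnen) :=
            hLmax _ ((PySem.List.mem_insertBy pvBf x _ as).mpr (Or.inr (List.getLast_mem hnen)))
          have h2' : ¬ pvLtp (as.getLast hnen) y := by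
            apply hM (as.getLast hnen) ?_ y List.mem_cons_self
            obtain ⟨c, cs, rfl⟩ := List.exists_cons_of_ne_nil hnen
            rw [List.getLast?_cons_cons]
            exact List.getLast?_eq_some_getLast hnen
          intro hc; exact h1' (pvLtp_of_ltp_of_not hc h2')
      · exact hLmax y h2

theorem pv_foldl_insertBy_ne_nil (vs : List (Int × Int)) (acc : List (Int × Int))
    (h : vs ≠ [] ∨ acc ≠ []) :
    vs.foldl (fun acc x => PySem.List.insertBy pvBf x acc) acc ≠ [] := by
  induction vs generalizing acc with
  | nil => simpa using h.resolve_left (by simp)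
  | cons v vs ih =>
    simp only [List.foldl_cons]
    exact ih _ (Or.inr (pv_insertBy_ne_nil v acc))

theorem pv_foldl_insertBy_maxLast (vs : List (Int × Int)) (acc : List (Int × Int))
    (h : pvMaxLast acc) :
    pvMaxLast (vs.foldl (fun acc x => PySem.List.insertBy pvBf x acc) acc) := by
  induction vs generalizing acc with
  | nil => exact h
  | cons v vs ih =>
    simp only [List.foldl_cons]
    exact ih _ (pv_maxLast_insertBy h v)

-- B's scan step
def pvStep : Option (Int × Int) → (Int × Int) → Option (Int × Int) :=
  fun best cv =>
    match best with
    | none => some cv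
    | some b => if cv.1 > b.1 ∨ (cv.1 = b.1 ∧ cv.2 < b.2) then some cv else some b

theorem pv_scan_inv (vs : List (Int × Int)) (b : Int × Int) :
    ∃ m, vs.foldl pvStep (some b) = some m ∧ (m = b ∨ m ∈ vs) ∧ ¬ pvLtp m b ∧ ∀ y ∈ vs, ¬ pvLtp m y := by
  induction vs generalizing b with
  | nil => exact ⟨b, rfl, Or.inl rfl, pvLtp_irrefl b, by simp⟩
  | cons v vs ih =>
    simp only [List.foldl_cons]
    by_cases hc : pvLtp b v
    · have hstep : pvStep (some b) v = some v := by
        simp only [pvStep]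
        rw [if_pos]
        rcases b with ⟨b1, b2⟩; rcases v with ⟨v1, v2⟩
        simp only [pvLtp] at hc
        rcases hc with h | ⟨h1, h2⟩
        · exact Or.inl h
        · exact Or.inr ⟨h1.symm, h2⟩
      rw [hstep]
      obtain ⟨m, hm, hmem, hnb, hall⟩ := ih v
      refine ⟨m, hm, ?_, ?_, ?_⟩
      · rcases hmem with h | h
        · exact Or.inr (by simp [h])
        · exact Or.inr (by simp [h])
      · exact fun hcb => hnb (pvLtp_trans hcb hc)
      · intro y hy
        rcases List.mem_cons.mp hy with h | h
        · subst h; exact hnb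
        · exact hall y h
    · have hstep : pvStep (some b) v = some b := by
        simp only [pvStep]
        rw [if_neg]
        rcases b with ⟨b1, b2⟩; rcases v with ⟨v1, v2⟩
        simp only [pvLtp] at hc
        intro hcon; rcases hcon with h | ⟨h1, h2⟩
        · exact hc (Or.inl h)
        · exact hc (Or.inr ⟨h1.symm, h2⟩)
      rw [hstep]
      obtain ⟨m, hm, hmem, hnb, hall⟩ := ih b
      refine ⟨m, hm, ?_, hnb, ?_⟩
      · rcases hmem with h | h
        · exact Or.inl h
        · exact Or.inr (by simp [h])
      · intro y hy
        rcases List.mem_cons.mp hy with h | h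
        · subst h
          exact fun hmv => hnb (pvLtp_of_ltp_of_not hmv hc)
        · exact hall y h

-- the two dict-building loops build the same dict
theorem pv_dict_eq (nums : List Int) (space : Int) :
    destroyTargetsGroups nums space = destroyTargetsGroups_alt nums space := by
  unfold destroyTargetsGroups destroyTargetsGroups_alt
  apply PySem.List.foldl_congr_mem
  intro d n _
  simp only
  set k := if PySem.Int.mod n space = 0 then space else PySem.Int.mod n space with hk
  by_cases hc : d.contains k = true
  · rw [if_pos hc]
    have hex : ∃ v, d.get? k = some v := by
      have := PySem.Dict.contains_eq_isSome_get? d k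
      rw [hc] at this
      exact Option.isSome_iff_exists.mp this.symm
    obtain ⟨v, hv⟩ := hex
    rw [PySem.Dict.getD_of_get?_eq_some d (0, 0) hv, PySem.Dict.getD_of_get?_eq_some d (0, n) hv]
  · rw [if_neg hc]
    rw [PySem.Dict.getD_of_not_contains d (0, n) (by simpa using hc)]
    simp

-- the group dict of a nonempty nums has a nonempty values list
theorem pv_values_ne_nil (nums : List Int) (space : Int) (h : nums ≠ []) :
    (destroyTargetsGroups_alt nums space).values ≠ [] := by
  have hkeys : (destroyTargetsGroups_alt nums space).keys
      = PySem.Set.ofList (nums.map (fun n => if PySem.Int.mod n space = 0 then space else PySem.Int.mod n space)) :=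
    PySem.Dict.keys_foldl_insert_key nums
      (fun n => if PySem.Int.mod n space = 0 then space else PySem.Int.mod n space)
      (fun d n => ((d.getD (if PySem.Int.mod n space = 0 then space else PySem.Int.mod n space) (0, n)).1 + 1,
        min (d.getD (if PySem.Int.mod n space = 0 then space else PySem.Int.mod n space) (0, n)).2 n))
      PySem.Dict.empty
  intro hval
  have hitems : (destroyTargetsGroups_alt nums space).items = [] := by
    have := hval
    simp only [PySem.Dict.values] at this
    exact List.map_eq_nil_iff.mp this
  have hknil : (destroyTargetsGroups_alt nums space).keys = [] := by
    simp [PySem.Dict.keys, hitems]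
  rw [hkeys] at hknil
  cases nums with
  | nil => exact h rfl
  | cons a as =>
    have hmem : (if PySem.Int.mod a space = 0 then space else PySem.Int.mod a space)
        ∈ PySem.Set.ofList ((a :: as).map (fun n => if PySem.Int.mod n space = 0 then space else PySem.Int.mod n space)) := by
      rw [PySem.Set.mem_ofList]
      simp
    rw [hknil] at hmem
    exact List.not_mem_nil hmem

-- the heart of the equivalence: on any nonempty values list, A's "last of the
-- stable sort by (count, -min)" and B's linear scan pick elements with equal keys
theorem pv_main (vs : List (Int × Int)) (hvne : vs ≠ []) :
    (PySem.List.pyGetD (PySem.List.sorted2 vs (fun x => x.1) (fun x => -x.2)) (-1) ((0 : Int), (0 : Int))).2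
    = match vs.foldl pvStep none with
      | some b => b.2
      | none => 0 := by
  have hsorted : PySem.List.sorted2 vs (fun x => x.1) (fun x => -x.2) =
      vs.foldl (fun acc x => PySem.List.insertBy pvBf x acc) [] := rfl
  have hsne : vs.foldl (fun acc x => PySem.List.insertBy pvBf x acc) [] ≠ [] :=
    pv_foldl_insertBy_ne_nil vs [] (Or.inl hvne)
  have hmax : pvMaxLast (vs.foldl (fun acc x => PySem.List.insertBy pvBf x acc) []) :=
    pv_foldl_insertBy_maxLast vs [] (by intro L hL; simp at hL)
  rw [hsorted, PySem.List.pyGetD_neg_one _ _ hsne]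
  have hperm : (vs.foldl (fun acc x => PySem.List.insertBy pvBf x acc) []).Perm vs := by
    rw [← hsorted]
    exact PySem.List.sorted2_perm vs (fun x => x.1) (fun x => -x.2) false
  set L := (vs.foldl (fun acc x => PySem.List.insertBy pvBf x acc) []).getLast hsne with hLdef
  have hLmem : L ∈ vs := hperm.mem_iff.mp (List.getLast_mem hsne)
  have hLmax : ∀ y ∈ vs, ¬ pvLtp L y := by
    intro y hy
    exact hmax L (List.getLast?_eq_some_getLast hsne) y (hperm.mem_iff.mpr hy)
  cases hvs' : vs with
  | nil => exact absurd hvs' hvne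
  | cons v rest =>
    obtain ⟨m, hm, hmem, hnb, hall⟩ := pv_scan_inv rest v
    have hmvs : m ∈ vs := by
      rw [hvs']
      rcases hmem with h | h
      · simp [h]
      · simp [h]
    have hmmax : ∀ y ∈ vs, ¬ pvLtp m y := by
      intro y hy
      rw [hvs'] at hy
      rcases List.mem_cons.mp hy with h | h
      · subst h; exact hnb
      · exact hall y h
    have hLm : L = m := pvLtp_antisymm (hLmax m hmvs) (hmmax L hLmem)
    have hfold : List.foldl pvStep none (v :: rest) = some m := by
      rw [List.foldl_cons, show pvStep none v = some v from rfl, hm]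
    rw [hLm, hfold]

-- ===== VERDICT (by name: the statement is the Claim_ definition above) =====
theorem destroyTargets_spec : Claim_equal_destroyTargets := by
  intro nums space _ hpre
  obtain ⟨hne, hsp⟩ := hpre
  unfold Spec_destroyTargets
  have h1 : destroyTargets nums space =
      (PySem.List.pyGetD (PySem.List.sorted2 (destroyTargetsGroups nums space).values
        (fun x => x.1) (fun x => -x.2)) (-1) ((0 : Int), (0 : Int))).2 := rfl
  have h2 : destroyTargets_alt nums space =
      (match (destroyTargetsGroups_alt nums space).values.foldl pvStep none with
       | some b => b.2
       | none => 0) := rfl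
  rw [h1, h2, pv_dict_eq nums space]
  exact pv_main _ (pv_values_ne_nil nums space hne)
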